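-- pv_equiv track=rewrite | github.com/leleea7/NLP | HW3/data_preprocessing.py | load_test
-- ===== SOURCE A (Python) =====
-- def load_test(sentences, word2id, pos_dict):
--     dataset = []
--     for sentence in sentences:
--         s = []
--         predicates_flag = []
--         for word in sentence:
--             lemma = word[2]
--             pos = word[4]
--             #predicate = word[13].replace('\n', '')
--             predicate = word[13]    # modificato
--             val = []
--             if lemma in word2id:
--                 val.append(word2id[lemma])
--             else:
--                 val.append(word2id['unk'])
--             val.append(pos_dict[pos])
--             s.append(val)
--             predicates_flag.append(0) if predicate == '_' else predicates_flag.append(1)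
--         indexes = [i for i in range(len(predicates_flag)) if predicates_flag[i] == 1]
--         if not indexes:
--             r = []
--             pred_flag = [0 for _ in range(len(s))]
--             for i in range(len(pred_flag)):
--                 # first element of the tuple: id of the lemma
--                 # second element of the tuple: id of the pos tag
--                 # third element of the tuple: 0 if the predicate is _, 1 otherwise
--                 r.append((s[i][0], s[i][1], pred_flag[i]))
--             dataset.append([r])
--         else:
--             sent = []
--             for index in indexes:
--                 r = []
--                 pred_flag = [0 for _ in range(len(s))]
--                 pred_flag[index] = 1
--                 for i in range(len(pred_flag)):
--                     # first element of the tuple: id of the lemma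
--                     # second element of the tuple: id of the pos tag
--                     # third element of the tuple: 0 if the predicate is _, 1 otherwise
--                     r.append((s[i][0], s[i][1], pred_flag[i]))
--                 sent.append(r)
--             dataset.append(sent)
--     return dataset
-- ===== SOURCE B (Python) =====
-- def load_test(sentences, word2id, pos_dict):
--     def enc(w):
--         lid = word2id[w[2]] if w[2] in word2id else word2id['unk']
--         return lid, pos_dict[w[4]]
--
--     dataset = []
--     for sentence in sentences:
--         sent = []
--         prefix = []
--         for i, w in enumerate(sentence):
--             l, p = enc(w)
--             if w[13] != '_':
--                 sent.append(prefix + [(l, p, 1)]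
--                             + [(l2, p2, 0) for l2, p2 in map(enc, sentence[i + 1:])])
--             prefix.append((l, p, 0))
--         dataset.append(sent if sent else [prefix])
--     return dataset
-- ===== Notes on version B (the rewrite author's own statement) =====
-- stated objective: alternative
-- what changed: B never builds A's parallel s/predicates_flag arrays, index list, or per-predicate pred_flag arrays: it streams each sentence once with a shared zero-flag prefix accumulator and, the moment a predicate word is met, emits that variant immediately as prefix + flagged tuple + a freshly encoded zero-flag suffix of the remaining words; with no predicates the prefix itself is the single row.
import Mathlib
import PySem

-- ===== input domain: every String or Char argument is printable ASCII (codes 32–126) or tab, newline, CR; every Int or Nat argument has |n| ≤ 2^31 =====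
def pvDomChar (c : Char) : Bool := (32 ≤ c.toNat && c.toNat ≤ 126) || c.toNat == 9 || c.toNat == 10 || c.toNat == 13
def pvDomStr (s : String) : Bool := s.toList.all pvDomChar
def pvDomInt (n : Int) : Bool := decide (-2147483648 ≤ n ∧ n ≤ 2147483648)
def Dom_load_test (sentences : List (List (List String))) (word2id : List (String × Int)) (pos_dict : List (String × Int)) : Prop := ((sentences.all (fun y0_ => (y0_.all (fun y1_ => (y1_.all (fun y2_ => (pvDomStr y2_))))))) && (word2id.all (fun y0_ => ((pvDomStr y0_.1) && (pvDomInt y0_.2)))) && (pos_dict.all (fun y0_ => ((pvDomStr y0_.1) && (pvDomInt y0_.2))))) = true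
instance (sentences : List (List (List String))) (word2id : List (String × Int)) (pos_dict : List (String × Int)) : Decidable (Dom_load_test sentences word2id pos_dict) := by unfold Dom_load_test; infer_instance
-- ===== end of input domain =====

-- B streams each sentence once: a shared zero-flag prefix accumulator, and each variant is emitted the
-- moment a predicate word is met (prefix ++ flagged tuple ++ freshly encoded zero-flag suffix); no index
-- list, no flag arrays, no base list to copy and patch (objective: alternative).

-- dict lookup on an association list (first match), shared primitive for both ports
def pvLookup (d : List (String × Int)) (k : String) : Option Int :=
  (d.find? (fun p => p.1 == k)).map (·.2)

-- ===== PORT A =====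
-- A's per-sentence body, kept step for step
def aSent (word2id : List (String × Int)) (pos_dict : List (String × Int))
    (sentence : List (List String)) : List (List (Int × Int × Int)) :=
  let sp := sentence.foldl (fun (acc : List (List Int) × List Int) word =>
    let lem := (PySem.List.pyGet? word 2).getD ""
    let pos := (PySem.List.pyGet? word 4).getD ""
    let predicate := (PySem.List.pyGet? word 13).getD ""
    let val : List Int :=
      (if (pvLookup word2id lem).isSome then [(pvLookup word2id lem).getD 0]
       else [(pvLookup word2id "unk").getD 0]) ++ [(pvLookup pos_dict pos).getD 0]
    (acc.1 ++ [val], acc.2 ++ [if predicate == "_" then (0:Int) else 1])) ([], [])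
  let s := sp.1
  let predicates_flag := sp.2
  let indexes := (List.range predicates_flag.length).filter
    (fun i => predicates_flag.getD i 0 == 1)
  if indexes.isEmpty then
    [(List.range s.length).map (fun i =>
      ((s.getD i []).getD 0 0, (s.getD i []).getD 1 0, (0 : Int)))]
  else
    indexes.map (fun idx =>
      (List.range s.length).map (fun i =>
        ((s.getD i []).getD 0 0, (s.getD i []).getD 1 0, if i = idx then (1:Int) else 0)))

def load_test (sentences : List (List (List String))) (word2id : List (String × Int)) (pos_dict : List (String × Int)) : List (List (List (Int × Int × Int))) :=
  sentences.foldl (fun dataset sentence => dataset ++ [aSent word2id pos_dict sentence]) []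

-- ===== PORT B =====
-- Source B's enc helper: (lemma id, pos id)
def bEnc (word2id : List (String × Int)) (pos_dict : List (String × Int))
    (w : List String) : Int × Int :=
  ((if (pvLookup word2id ((PySem.List.pyGet? w 2).getD "")).isSome
      then (pvLookup word2id ((PySem.List.pyGet? w 2).getD "")).getD 0
      else (pvLookup word2id "unk").getD 0),
   (pvLookup pos_dict ((PySem.List.pyGet? w 4).getD "")).getD 0)

-- Source B's per-sentence loop: one enumerate pass carrying (sent, prefix); a variant is emitted at once
-- when word[13] != '_', as prefix ++ [flagged] ++ encoded suffix of sentence[i+1:]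
def bSent (word2id : List (String × Int)) (pos_dict : List (String × Int))
    (sentence : List (List String)) : List (List (Int × Int × Int)) :=
  let st := (PySem.List.enumerate sentence).foldl
    (fun (acc : List (List (Int × Int × Int)) × List (Int × Int × Int)) iw =>
      let lp := bEnc word2id pos_dict iw.2
      let sent :=
        if !((PySem.List.pyGet? iw.2 13).getD "" == "_") then
          acc.1 ++ [acc.2 ++ [(lp.1, lp.2, 1)] ++
            ((PySem.List.slice sentence (some (iw.1 + 1)) none).map
              (fun w2 => ((bEnc word2id pos_dict w2).1, (bEnc word2id pos_dict w2).2, (0:Int))))]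
        else acc.1
      (sent, acc.2 ++ [(lp.1, lp.2, 0)])) ([], [])
  if st.1 = [] then [st.2] else st.1

def load_test_alt (sentences : List (List (List String))) (word2id : List (String × Int)) (pos_dict : List (String × Int)) : List (List (List (Int × Int × Int))) :=
  sentences.foldl (fun dataset sentence => dataset ++ [bSent word2id pos_dict sentence]) []

-- ===== PRECONDITION & SPEC =====
-- Pre_ excludes exactly the inputs where Python A raises: a word shorter than 14 entries (IndexError),
-- a lemma absent from word2id with no 'unk' key (KeyError), or a POS tag absent from pos_dict (KeyError).
def Pre_load_test (sentences : List (List (List String))) (word2id : List (String × Int)) (pos_dict : List (String × Int)) : Prop :=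
  (sentences.all (fun sentence => sentence.all (fun word =>
    decide (14 ≤ word.length) &&
    ((pvLookup word2id ((PySem.List.pyGet? word 2).getD "")).isSome ||
     (pvLookup word2id "unk").isSome) &&
    (pvLookup pos_dict ((PySem.List.pyGet? word 4).getD "")).isSome))) = true
instance (sentences : List (List (List String))) (word2id : List (String × Int)) (pos_dict : List (String × Int)) : Decidable (Pre_load_test sentences word2id pos_dict) := by unfold Pre_load_test; infer_instance

def pvWitness_load_test : List (List (List String)) × (List (String × Int)) × (List (String × Int)) :=
  ([[["0","1","dog","3","NN","5","6","7","8","9","10","11","12","_"],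
     ["0","1","run","3","VB","5","6","7","8","9","10","11","12","run.01"]]],
   [("dog", 7), ("unk", 0)], [("NN", 1), ("VB", 2)])

def Spec_load_test (sentences : List (List (List String))) (word2id : List (String × Int)) (pos_dict : List (String × Int)) (out : List (List (List (Int × Int × Int)))) : Prop := out = load_test_alt sentences word2id pos_dict
instance (sentences : List (List (List String))) (word2id : List (String × Int)) (pos_dict : List (String × Int)) (out : List (List (List (Int × Int × Int)))) : Decidable (Spec_load_test sentences word2id pos_dict out) := by unfold Spec_load_test; infer_instance

-- ===== CLAIM (what is proved, stated in full; the proofs are below) =====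
def Claim_equal_load_test : Prop := ∀ (sentences : List (List (List String))) (word2id : List (String × Int)) (pos_dict : List (String × Int)), Dom_load_test sentences word2id pos_dict → Pre_load_test sentences word2id pos_dict → Spec_load_test sentences word2id pos_dict (load_test sentences word2id pos_dict)

-- ===== LEMMAS AND PROOFS =====

-- proof-side vocabulary: the zero-flag tuple / the flagged tuple of a word
def pvZero (word2id pos_dict : List (String × Int)) (w : List String) : Int × Int × Int :=
  ((bEnc word2id pos_dict w).1, (bEnc word2id pos_dict w).2, 0)
def pvOne (word2id pos_dict : List (String × Int)) (w : List String) : Int × Int × Int :=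
  ((bEnc word2id pos_dict w).1, (bEnc word2id pos_dict w).2, 1)

-- the common normal form both per-sentence computations are reduced to
def pvSpecSent (word2id pos_dict : List (String × Int))
    (sentence : List (List String)) : List (List (Int × Int × Int)) :=
  let base := sentence.map (pvZero word2id pos_dict)
  let idxs := (List.range sentence.length).filter
    (fun i => !((PySem.List.pyGet? (sentence.getD i default) 13).getD "" == "_"))
  if idxs = [] then [base]
  else idxs.map (fun k =>
    base.take k ++ pvOne word2id pos_dict (sentence.getD k default) :: base.drop (k+1))

theorem pv_bfold (word2id pos_dict : List (String × Int)) (sentence : List (List String)) :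
    ∀ (rest : List (List String)) (j : Nat) (sent : List (List (Int × Int × Int))),
    sentence.drop j = rest →
    (PySem.List.enumerate rest (j:Int)).foldl
      (fun (acc : List (List (Int × Int × Int)) × List (Int × Int × Int)) iw =>
        let lp := bEnc word2id pos_dict iw.2
        let s :=
          if !((PySem.List.pyGet? iw.2 13).getD "" == "_") then
            acc.1 ++ [acc.2 ++ [(lp.1, lp.2, 1)] ++
              ((PySem.List.slice sentence (some (iw.1 + 1)) none).map
                (fun w2 => ((bEnc word2id pos_dict w2).1, (bEnc word2id pos_dict w2).2, (0:Int))))]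
          else acc.1
        (s, acc.2 ++ [(lp.1, lp.2, 0)]))
      (sent, (sentence.map (pvZero word2id pos_dict)).take j)
    = (sent ++ ((List.range rest.length).filter
          (fun t => !((PySem.List.pyGet? (rest.getD t default) 13).getD "" == "_"))).map
          (fun t => (sentence.map (pvZero word2id pos_dict)).take (j+t) ++
            pvOne word2id pos_dict (rest.getD t default) ::
            (sentence.map (pvZero word2id pos_dict)).drop (j+t+1)),
       sentence.map (pvZero word2id pos_dict)) := by
  intro rest
  induction rest with
  | nil =>
      intro j sent h
      have hj : sentence.length ≤ j := by
        have := congrArg List.length h; simp at this; omega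
      simp [PySem.List.enumerate_nil, List.take_of_length_le, hj]
  | cons w ws ih =>
      intro j sent h
      have hlen := congrArg List.length h
      simp only [List.length_drop, List.length_cons] at hlen
      have hj : j < sentence.length := by omega
      have hw : sentence[j]? = some w := by
        have h0 : (sentence.drop j)[0]? = some w := by rw [h]; rfl
        simpa using h0
      have hws : sentence.drop (j+1) = ws := by
        have : (sentence.drop j).drop 1 = ws := by rw [h]; rfl
        simpa [List.drop_drop, Nat.add_comm] using this
      set base := sentence.map (pvZero word2id pos_dict) with hbase
      have htake : base.take j ++ [pvZero word2id pos_dict w] = base.take (j+1) := by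
        rw [List.take_add_one]
        congr 1
        rw [hbase, List.getElem?_map, hw]; rfl
      have hdrop : (PySem.List.slice sentence (some ((j:Int) + 1)) none).map
            (fun w2 => ((bEnc word2id pos_dict w2).1, (bEnc word2id pos_dict w2).2, (0:Int)))
          = base.drop (j+1) := by
        have : ((j:Int) + 1) = ((j+1 : Nat) : Int) := by push_cast; ring
        rw [this, PySem.List.slice_from_natCast, hbase, List.map_drop]
        rfl
      rw [PySem.List.enumerate_cons, List.foldl_cons]
      simp only
      have hstep : ∀ b : Bool,
          (if b then sent ++ [base.take j ++ [((bEnc word2id pos_dict w).1, (bEnc word2id pos_dict w).2, (1:Int))] ++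
              ((PySem.List.slice sentence (some ((j:Int) + 1)) none).map
                (fun w2 => ((bEnc word2id pos_dict w2).1, (bEnc word2id pos_dict w2).2, (0:Int))))]
           else sent)
          = (if b then sent ++ [base.take j ++ pvOne word2id pos_dict w :: base.drop (j+1)] else sent) := by
        intro b; cases b <;> simp [hdrop, pvOne]
      rw [hstep]
      have henc : ((j:Int) + 1) = ((j+1 : Nat) : Int) := by push_cast; ring
      have hpz : ((bEnc word2id pos_dict w).1, (bEnc word2id pos_dict w).2, (0:Int))
          = pvZero word2id pos_dict w := rfl
      rw [hpz, htake, henc,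
        ih (j+1) _ hws]
      have hr : List.range (ws.length + 1) = 0 :: (List.range ws.length).map Nat.succ := by
        simp [List.range_succ_eq_map]
      rw [Prod.mk.injEq]
      refine ⟨?_, rfl⟩
      rw [List.length_cons, hr, List.filter_cons]
      simp only [List.getD_cons_zero]
      have hshift : ((List.range ws.length).map Nat.succ).filter
            (fun t => !((PySem.List.pyGet? ((w :: ws).getD t default) 13).getD "" == "_"))
          = ((List.range ws.length).filter
              (fun t => !((PySem.List.pyGet? (ws.getD t default) 13).getD "" == "_"))).map Nat.succ := by
        rw [List.filter_map]
        congr 1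
      have hmap : ∀ l : List Nat, (l.map Nat.succ).map
            (fun t => base.take (j+t) ++ pvOne word2id pos_dict ((w :: ws).getD t default) :: base.drop (j+t+1))
          = l.map (fun t => base.take ((j+1)+t) ++ pvOne word2id pos_dict (ws.getD t default) :: base.drop ((j+1)+t+1)) := by
        intro l
        rw [List.map_map]
        apply List.map_congr_left; intro t _
        simp only [Function.comp, Nat.succ_eq_add_one, List.getD_cons_succ]
        have h1 : j + (t+1) = (j+1)+t := by omega
        rw [h1]
      by_cases hc : (!((PySem.List.pyGet? w 13).getD "" == "_")) = true
      · rw [if_pos hc, if_pos hc, List.map_cons, hshift, hmap, List.append_assoc]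
        congr 2
      · rw [if_neg hc, if_neg hc, hshift, hmap]

-- B's per-sentence loop computes the normal form
theorem pv_bSent (word2id pos_dict : List (String × Int)) (sentence : List (List String)) :
    bSent word2id pos_dict sentence = pvSpecSent word2id pos_dict sentence := by
  unfold bSent pvSpecSent
  have h0 : (PySem.List.enumerate sentence : List (Int × List String))
      = PySem.List.enumerate sentence ((0:Nat):Int) := by norm_num
  have := pv_bfold word2id pos_dict sentence sentence 0 [] (by simp)
  simp only [List.take_zero, Nat.zero_add] at this
  rw [h0, this]
  simp only [List.nil_append]
  by_cases he : ((List.range sentence.length).filter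
      (fun i => !((PySem.List.pyGet? (sentence.getD i default) 13).getD "" == "_"))) = []
  · rw [he]; simp
  · rw [if_neg (fun hx => he (List.map_eq_nil_iff.mp hx)), if_neg he]

-- A's per-sentence body computes the normal form
theorem pv_aSent (word2id pos_dict : List (String × Int)) (sentence : List (List String)) :
    aSent word2id pos_dict sentence = pvSpecSent word2id pos_dict sentence := by
  unfold aSent pvSpecSent
  rw [PySem.List.foldl_prod_mk
        (fun a word => a ++ [(if (pvLookup word2id ((PySem.List.pyGet? word 2).getD "")).isSome
            then [(pvLookup word2id ((PySem.List.pyGet? word 2).getD "")).getD 0]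
            else [(pvLookup word2id "unk").getD 0]) ++
            [(pvLookup pos_dict ((PySem.List.pyGet? word 4).getD "")).getD 0]])
        (fun b word => b ++ [if (PySem.List.pyGet? word 13).getD "" == "_" then (0:Int) else 1]),
      PySem.List.foldl_append_singleton_eq_map, PySem.List.foldl_append_singleton_eq_map]
  simp only [List.nil_append]
  set fA := fun (word : List String) =>
    ((if (pvLookup word2id ((PySem.List.pyGet? word 2).getD "")).isSome then
        [(pvLookup word2id ((PySem.List.pyGet? word 2).getD "")).getD 0]
      else [(pvLookup word2id "unk").getD 0]) ++
      [(pvLookup pos_dict ((PySem.List.pyGet? word 4).getD "")).getD 0]) with hfA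
  have hfw : ∀ w : List String,
      fA w = [(bEnc word2id pos_dict w).1, (bEnc word2id pos_dict w).2] := by
    intro w
    rw [hfA]; unfold bEnc
    cases hl : pvLookup word2id ((PySem.List.pyGet? w 2).getD "") <;> simp [hl]
  have hidx : (List.range (sentence.map (fun word =>
        if (PySem.List.pyGet? word 13).getD "" == "_" then (0:Int) else 1)).length).filter
        (fun i => (sentence.map (fun word =>
          if (PySem.List.pyGet? word 13).getD "" == "_" then (0:Int) else 1)).getD i 0 == 1)
      = (List.range sentence.length).filter
        (fun i => !((PySem.List.pyGet? (sentence.getD i default) 13).getD "" == "_")) := by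
    simp only [List.length_map]
    apply List.filter_congr
    intro i hi
    rw [List.mem_range] at hi
    rw [List.getD_eq_getElem _ 0 (n := i) (by simpa), List.getElem_map,
        List.getD_eq_getElem sentence default (n := i) hi]
    by_cases h : ((PySem.List.pyGet? sentence[i] 13).getD "" == "_") = true <;> simp [h]
  have hbase : (List.range (sentence.map fA).length).map (fun i =>
        (((sentence.map fA).getD i []).getD 0 0, ((sentence.map fA).getD i []).getD 1 0, (0:Int)))
      = sentence.map (pvZero word2id pos_dict) := by
    apply List.ext_getElem (by simp)
    intro i h1 h2
    have hi : i < sentence.length := by simpa using h2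
    have hgd : (sentence.map fA).getD i [] = fA sentence[i] := by
      rw [List.getD_eq_getElem (sentence.map fA) [] (n := i) (by simpa), List.getElem_map]
    rw [List.getElem_map, List.getElem_range, hgd, hfw, List.getElem_map]
    simp only [List.getD_cons_zero]
    rfl
  rw [hidx]
  set idxs := (List.range sentence.length).filter
    (fun i => !((PySem.List.pyGet? (sentence.getD i default) 13).getD "" == "_")) with hidxs
  have hlt : ∀ i ∈ idxs, i < sentence.length := by
    intro i hi
    rw [hidxs, List.mem_filter, List.mem_range] at hi
    exact hi.1
  by_cases he : idxs = []
  · rw [he]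
    simp only [List.isEmpty_nil, if_true]
    rw [hbase]
  · have h1 : idxs.isEmpty = false := by simp [he]
    rw [h1, if_neg he]
    simp only [Bool.false_eq_true, if_false]
    apply List.map_congr_left
    intro idx hidxmem
    have hlt' : idx < sentence.length := hlt idx hidxmem
    set base := sentence.map (pvZero word2id pos_dict) with hb
    have hset : base.take idx ++ pvOne word2id pos_dict (sentence.getD idx default) :: base.drop (idx+1)
        = base.set idx (pvOne word2id pos_dict (sentence.getD idx default)) := by
      exact (List.set_eq_take_cons_drop _ (by simpa [hb] using hlt')).symm
    rw [hset]
    apply List.ext_getElem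
    · simp [hb]
    · intro i h1' h2'
      have hi : i < sentence.length := by simpa using h1'
      have hgd : (sentence.map fA).getD i [] = fA sentence[i] := by
        rw [List.getD_eq_getElem (sentence.map fA) [] (n := i) (by simpa), List.getElem_map]
      rw [List.getElem_map, List.getElem_range, hgd, hfw]
      simp only [List.getD_cons_zero]
      rw [List.getElem_set]
      by_cases h : idx = i
      · subst h
        rw [if_pos rfl, if_pos rfl]
        rw [List.getD_eq_getElem sentence default (n := idx) hlt']
        rfl
      · rw [if_neg h, if_neg (fun hh => h hh.symm)]
        simp [hb, pvZero]

theorem pv_main (sentences : List (List (List String))) (word2id pos_dict : List (String × Int)) :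
    load_test sentences word2id pos_dict = load_test_alt sentences word2id pos_dict := by
  unfold load_test load_test_alt
  rw [PySem.List.foldl_append_singleton_eq_map, PySem.List.foldl_append_singleton_eq_map]
  simp only [List.nil_append]
  apply List.map_congr_left
  intro sentence _
  rw [pv_aSent, pv_bSent]

theorem load_test_spec : Claim_equal_load_test := by
  intro sentences word2id pos_dict _ _
  unfold Spec_load_test
  exact pv_main sentences word2id pos_dict
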